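-- pv_equiv track=rewrite | github.com/AbdullaB1/leetcode | 57. Insert Interval.py | search_first_overlap
-- ===== SOURCE A (Python) =====
-- from typing import List
--
-- def search_first_overlap(intervals: List[List[int]], newInterval: List[int]) -> int:
--     l = 0
--     r = len(intervals) - 1
--     target = newInterval[0]
--     while l < r:
--         mid = (l + r) // 2
--         if intervals[mid][1] >= target:
--             r = mid
--         else:
--             l = mid + 1
--     return l
-- ===== SOURCE B (Python) =====
-- def search_first_overlap(intervals, newInterval):
--     target = newInterval[0]
--
--     def go(base, seg):
--         # binary search on a shrinking window (a slice of intervals); base is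
--         # the index in the original list of seg's first element
--         n = len(seg)
--         if n <= 1:
--             return base
--         m = (n - 1) // 2
--         if seg[m][1] >= target:
--             return go(base, seg[:m + 1])
--         return go(base + m + 1, seg[m + 1:])
--
--     return go(0, intervals)
-- ===== Notes on version B (the rewrite author's own statement) =====
-- stated objective: alternative
-- what changed: The l/r index-juggling while loop is replaced by a recursive helper that binary-searches a shrinking slice of the list, carrying only the slice and the original index of its first element.
-- outside the precondition, e.g. on search_first_overlap([[1, 5], [2]], [0]): A returns 0, B returns 0
import Mathlib
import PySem

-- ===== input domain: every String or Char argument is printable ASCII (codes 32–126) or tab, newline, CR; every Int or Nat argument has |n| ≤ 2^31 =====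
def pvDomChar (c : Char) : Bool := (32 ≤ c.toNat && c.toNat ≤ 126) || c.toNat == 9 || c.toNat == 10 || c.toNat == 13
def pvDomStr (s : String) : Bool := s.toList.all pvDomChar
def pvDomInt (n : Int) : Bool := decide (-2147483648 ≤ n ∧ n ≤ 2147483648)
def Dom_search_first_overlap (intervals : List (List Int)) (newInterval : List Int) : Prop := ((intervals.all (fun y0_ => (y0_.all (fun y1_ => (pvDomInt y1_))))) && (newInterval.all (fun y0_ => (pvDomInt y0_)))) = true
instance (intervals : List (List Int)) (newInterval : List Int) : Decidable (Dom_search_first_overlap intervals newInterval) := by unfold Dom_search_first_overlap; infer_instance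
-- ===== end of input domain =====

-- B replaces A's l/r index-juggling while loop by a recursive helper that binary-searches a
-- shrinking slice of the list (objective: alternative decomposition, same probe count).

-- ===== PORT A =====
-- the while loop of A, state (l, r); structural fuel only makes the loop total in Lean
-- (fuel = intervals.length + 1 bounds the iteration count: the window [l, r] shrinks each turn);
-- `.getD` only makes the out-of-range access total (unreachable under Pre_, where Python A returns)
def pvLoopA (fuel : Nat) (intervals : List (List Int)) (target l r : Int) : Int :=
  match fuel with
  | 0 => l
  | fuel + 1 =>
    if l < r then
      let mid := PySem.Int.floordiv (l + r) 2
      if (PySem.List.pyGet? ((PySem.List.pyGet? intervals mid).getD []) 1).getD 0 ≥ target then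
        pvLoopA fuel intervals target l mid
      else
        pvLoopA fuel intervals target (mid + 1) r
    else l

def search_first_overlap (intervals : List (List Int)) (newInterval : List Int) : Int :=
  let l : Int := 0
  let r : Int := PySem.List.len intervals - 1
  let target := (PySem.List.pyGet? newInterval 0).getD 0
  pvLoopA (intervals.length + 1) intervals target l r

-- ===== PORT B =====
-- B's helper go(base, seg): binary search on a shrinking slice; seg[:m+1] = seg.take (m+1),
-- seg[m+1:] = seg.drop (m+1) (exact for these nonnegative bounds); structural fuel only makes
-- the recursion total (the slice shrinks each call); `.getD` only for totality
def pvGoB (fuel : Nat) (target : Int) (base : Int) (seg : List (List Int)) : Int :=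
  match fuel with
  | 0 => base
  | fuel + 1 =>
    let n := seg.length
    if n ≤ 1 then base
    else
      let m := (n - 1) / 2
      if (PySem.List.pyGet? ((seg[m]?).getD []) 1).getD 0 ≥ target then
        pvGoB fuel target base (seg.take (m + 1))
      else
        pvGoB fuel target (base + (m : Int) + 1) (seg.drop (m + 1))

def search_first_overlap_alt (intervals : List (List Int)) (newInterval : List Int) : Int :=
  let target := (PySem.List.pyGet? newInterval 0).getD 0
  pvGoB (intervals.length + 1) target 0 intervals

-- ===== PRECONDITION & SPEC =====
-- Pre_ excludes the inputs where Python A raises IndexError: empty newInterval, and (when the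
-- search loop runs, i.e. at least two intervals) an inner list shorter than 2.  This is slightly
-- narrower than A's exact domain: with ≥ 2 intervals, only the intervals the search actually
-- probes need length ≥ 2; that probe set is algorithm-dependent, not closed-form.  B raises on
-- exactly the same accesses.
def Pre_search_first_overlap (intervals : List (List Int)) (newInterval : List Int) : Prop :=
  newInterval ≠ [] ∧ (intervals.length ≤ 1 ∨ ∀ iv ∈ intervals, 2 ≤ iv.length)
instance (intervals : List (List Int)) (newInterval : List Int) : Decidable (Pre_search_first_overlap intervals newInterval) := by unfold Pre_search_first_overlap; infer_instance

def pvWitness_search_first_overlap : List (List Int) × List Int := ([[1, 3], [4, 7], [8, 9]], [5])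

def Spec_search_first_overlap (intervals : List (List Int)) (newInterval : List Int) (out : Int) : Prop := out = search_first_overlap_alt intervals newInterval
instance (intervals : List (List Int)) (newInterval : List Int) (out : Int) : Decidable (Spec_search_first_overlap intervals newInterval out) := by unfold Spec_search_first_overlap; infer_instance

-- ===== CLAIM (what is proved, stated in full; the proofs are below) =====
def Claim_equal_search_first_overlap : Prop := ∀ (intervals : List (List Int)) (newInterval : List Int), Dom_search_first_overlap intervals newInterval → Pre_search_first_overlap intervals newInterval → Spec_search_first_overlap intervals newInterval (search_first_overlap intervals newInterval)

-- ===== LEMMAS AND PROOFS =====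

-- the while loop over window [l, l+n-1] equals B's recursion on the slice intervals[l : l+n];
-- both consume one unit of fuel per step, so the same fuel (any fuel ≥ n) serves both sides
lemma pvLoopA_eq_pvGoB (intervals : List (List Int)) (target : Int) :
    ∀ (fuel n l : Nat), n ≤ fuel → l + n ≤ intervals.length →
      pvLoopA fuel intervals target (l : Int) ((l : Int) + (n : Int) - 1) =
        pvGoB fuel target (l : Int) ((intervals.drop l).take n) := by
  intro fuel
  induction fuel with
  | zero => intro n l hf _; interval_cases n; simp [pvLoopA, pvGoB]
  | succ fuel ih =>
    intro n l hf hlen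
    have hseg : ((intervals.drop l).take n).length = n := by
      simp [List.length_take, List.length_drop]; omega
    by_cases hn : n ≤ 1
    · rw [pvLoopA, if_neg (by omega : ¬ ((l : Int) < (l : Int) + (n : Int) - 1))]
      rw [pvGoB]
      simp only [hseg]
      rw [if_pos hn]
    · have hm : (n - 1) / 2 < n - 1 := by omega
      set m : Nat := (n - 1) / 2 with hmdef
      have hmid : PySem.Int.floordiv ((l : Int) + ((l : Int) + (n : Int) - 1)) 2
          = ((l + m : Nat) : Int) := by
        rw [PySem.Int.floordiv_eq_ediv_of_pos (by omega)]
        simp only [hmdef]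
        push_cast
        omega
      have hprobe : (PySem.List.pyGet? intervals ((l + m : Nat) : Int)).getD []
          = (((intervals.drop l).take n)[m]?).getD [] := by
        rw [PySem.List.pyGet?_natCast]
        rw [List.getElem?_take_of_lt (by omega), List.getElem?_drop]
      rw [pvLoopA, if_pos (by omega : ((l : Int) < (l : Int) + (n : Int) - 1))]
      rw [pvGoB]
      simp only [hseg]
      rw [if_neg hn]
      simp only [hmid, hprobe, ← hmdef]
      split_ifs with hc
      · have := ih (m + 1) l (by omega) (by omega)
        have harg : ((l : Int) + ((m + 1 : Nat) : Int) - 1) = ((l + m : Nat) : Int) := by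
          push_cast; ring
        rw [harg] at this
        rw [this, List.take_take]
        congr 2
        omega
      · have := ih (n - (m + 1)) (l + m + 1) (by omega) (by omega)
        have harg : (((l + m + 1 : Nat)) : Int) + ((n - (m + 1) : Nat) : Int) - 1
            = (l : Int) + (n : Int) - 1 := by push_cast [Nat.cast_sub (by omega : m + 1 ≤ n)]; ring
        rw [harg] at this
        rw [show ((l + m : Nat) : Int) + 1 = ((l + m + 1 : Nat) : Int) by push_cast; ring, this]
        rw [List.drop_take, List.drop_drop]
        congr 2

-- ===== VERDICT (by name: the statement is the Claim_ definition above) =====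
theorem search_first_overlap_spec : Claim_equal_search_first_overlap := by
  intro intervals newInterval _hdom _hpre
  unfold Spec_search_first_overlap search_first_overlap search_first_overlap_alt
  have h := pvLoopA_eq_pvGoB intervals ((PySem.List.pyGet? newInterval 0).getD 0)
    (intervals.length + 1) intervals.length 0 (by omega) (by omega)
  simp only [Nat.cast_zero, zero_add, List.drop_zero, List.take_length] at h
  simpa [PySem.List.len_eq] using h
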